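-- pv_equiv track=rewrite | github.com/sheethalduvvuru/Sumofsquares.py | Sum_of_Squares.py | squaresum
-- ===== SOURCE A (Python) =====
-- def squaresum(counter,alist):
--  if counter==0:
--     return 0
--  else:
--     if int(alist[counter-1])<0:
--         return 0 + squaresum(counter-1, alist)
--     else:
--         return int(alist[counter-1])**2 + squaresum(counter-1,alist)
-- ===== SOURCE B (Python) =====
-- def squaresum(counter, alist):
--     # sum-of-generator over the index range, keeping only non-negative values
--     return sum(int(alist[i]) ** 2 for i in range(counter) if int(alist[i]) >= 0)
-- ===== Notes on version B (the rewrite author's own statement) =====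
-- stated objective: idiomatic
-- what changed: Replaced the high-to-low non-tail recursion by a single sum-of-generator expression filtering and squaring over range(counter).
import Mathlib
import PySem

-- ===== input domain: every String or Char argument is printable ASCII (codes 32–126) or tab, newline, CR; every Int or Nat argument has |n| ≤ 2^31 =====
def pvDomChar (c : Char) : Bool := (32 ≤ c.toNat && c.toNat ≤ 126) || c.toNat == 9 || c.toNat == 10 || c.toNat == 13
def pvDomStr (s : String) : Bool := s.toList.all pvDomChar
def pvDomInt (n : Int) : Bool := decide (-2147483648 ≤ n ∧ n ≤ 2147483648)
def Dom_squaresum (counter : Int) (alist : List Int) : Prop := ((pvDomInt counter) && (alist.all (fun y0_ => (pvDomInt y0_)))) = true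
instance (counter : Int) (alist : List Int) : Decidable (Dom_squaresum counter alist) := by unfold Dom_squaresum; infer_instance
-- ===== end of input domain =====

-- B replaces A's high-to-low recursion by a sum-of-generator over range(counter) (idiomatic; same cost).


-- ===== PORT A =====
-- A recurses on counter; on counter < 0 the Python never returns (and on an out-of-range
-- index it raises IndexError) — both are outside Pre_, where the port returns 0 as a mere
-- totality guard (the ≤ 0 test doubles as the 'counter == 0' test plus fuel).
def squaresum (counter : Int) (alist : List Int) : Int :=
  if _h : counter ≤ 0 then 0
  else
    match PySem.List.pyGet? alist (counter - 1) with
    | none => 0  -- IndexError in Python; excluded by Pre_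
    | some v =>
      if v < 0 then 0 + squaresum (counter - 1) alist
      else v ^ 2 + squaresum (counter - 1) alist
termination_by counter.toNat
decreasing_by all_goals omega

-- ===== PORT B =====
-- B's generator: sum of int(alist[i])**2 over i in range(counter) with int(alist[i]) >= 0.
-- pyGet?.getD 0 is only a totality default: inside Pre_ every index is in range.
def squaresum_alt (counter : Int) (alist : List Int) : Int :=
  (((PySem.List.pyRange 0 counter 1).filter
      (fun i => 0 ≤ (PySem.List.pyGet? alist i).getD 0)).map
    (fun i => ((PySem.List.pyGet? alist i).getD 0) ^ 2)).sum

-- ===== PRECONDITION & SPEC =====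
-- Pre_ excludes counter < 0 (A recurses forever until RecursionError/IndexError) and
-- counter > len(alist) (IndexError).
def Pre_squaresum (counter : Int) (alist : List Int) : Prop :=
  0 ≤ counter ∧ counter ≤ alist.length
instance (counter : Int) (alist : List Int) : Decidable (Pre_squaresum counter alist) := by
  unfold Pre_squaresum; infer_instance

def pvWitness_squaresum : Int × List Int := (3, [2, -1, 4])

def Spec_squaresum (counter : Int) (alist : List Int) (out : Int) : Prop := out = squaresum_alt counter alist
instance (counter : Int) (alist : List Int) (out : Int) : Decidable (Spec_squaresum counter alist out) := by unfold Spec_squaresum; infer_instance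

-- ===== CLAIM (what is proved, stated in full; the proofs are below) =====
def Claim_equal_squaresum : Prop := ∀ (counter : Int) (alist : List Int), Dom_squaresum counter alist → Pre_squaresum counter alist → Spec_squaresum counter alist (squaresum counter alist)

-- ===== LEMMAS AND PROOFS =====
-- Characterisation: A on the first n indices equals B's filter-map-sum over range n.
theorem squaresum_range (alist : List Int) (n : Nat) (h : n ≤ alist.length) :
    squaresum (n : Int) alist = squaresum_alt (n : Int) alist := by
  induction n with
  | zero => rw [squaresum]; simp [squaresum_alt]
  | succ m ih =>
    rw [squaresum]
    have hm : m < alist.length := by omega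
    have hidx : ((m + 1 : Nat) : Int) - 1 = ((m : Nat) : Int) := by push_cast; ring
    simp only [hidx, PySem.List.pyGet?_natCast, List.getElem?_eq_getElem hm]
    have hrec := ih (by omega)
    have hrange : PySem.List.pyRange 0 ((m + 1 : Nat) : Int) 1
        = PySem.List.pyRange 0 ((m : Nat) : Int) 1 ++ [((m : Nat) : Int)] := by
      have : ((m + 1 : Nat) : Int) = ((m : Nat) : Int) + 1 := by push_cast; ring
      rw [this, PySem.List.pyRange_one_succ_right (by omega)]
    unfold squaresum_alt
    rw [hrange, List.filter_append, List.map_append, List.sum_append]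
    have h2 : alist[m]? = some alist[m] := List.getElem?_eq_getElem hm
    by_cases hv : alist[m] < 0
    · rw [if_pos hv, hrec]
      unfold squaresum_alt
      simp [h2, not_le.mpr hv]
    · rw [if_neg hv, hrec]
      unfold squaresum_alt
      simp [h2, not_lt.mp hv]
      rw [if_neg (show ¬ ((m : Int) < 0) by omega)]
      ring

-- ===== VERDICT (by name: the statement is the Claim_ definition above) =====
theorem squaresum_spec : Claim_equal_squaresum := by
  intro counter alist _ hpre
  obtain ⟨h0, hlen⟩ := hpre
  unfold Spec_squaresum
  obtain ⟨n, rfl⟩ : ∃ n : Nat, counter = (n : Int) := ⟨counter.toNat, (Int.toNat_of_nonneg h0).symm⟩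
  exact squaresum_range alist n (by exact_mod_cast hlen)
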